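-- pv_equiv track=rewrite | github.com/kurisu-004/mahjong | src/game/shouTaikyoku.py | _transfer_hai
-- ===== SOURCE A (Python) =====
-- def _transfer_hai(hai)->list:
--     new_hai = []
--     for x in hai:
--         if x == 16:
--             temp = 34
--
--         elif x == 52:
--             temp = 35
--
--         elif x == 88:
--             temp = 36
--
--         else:
--             temp = x//4
--
--         new_hai.append(temp)
--
--     new_hai.sort()
--     return new_hai
-- ===== SOURCE B (Python) =====
-- def _transfer_hai(hai)->list:
--     out = []
--     for x in hai:
--         if x == 16:
--             v = 34
--         elif x == 52:
--             v = 35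
--         elif x == 88:
--             v = 36
--         else:
--             v = x // 4
--         lo, hi = 0, len(out)
--         while lo < hi:
--             mid = (lo + hi) // 2
--             if out[mid] <= v:
--                 lo = mid + 1
--             else:
--                 hi = mid
--         out.insert(lo, v)
--     return out
-- ===== Notes on version B (the rewrite author's own statement) =====
-- stated objective: alternative
-- what changed: Replaces the two-stage map-then-.sort() with a single online pass: each mapped value is placed directly at its sorted position in the output, found by a hand-written binary search (online binary insertion sort; no intermediate unsorted list, no library sort).
import Mathlib
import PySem

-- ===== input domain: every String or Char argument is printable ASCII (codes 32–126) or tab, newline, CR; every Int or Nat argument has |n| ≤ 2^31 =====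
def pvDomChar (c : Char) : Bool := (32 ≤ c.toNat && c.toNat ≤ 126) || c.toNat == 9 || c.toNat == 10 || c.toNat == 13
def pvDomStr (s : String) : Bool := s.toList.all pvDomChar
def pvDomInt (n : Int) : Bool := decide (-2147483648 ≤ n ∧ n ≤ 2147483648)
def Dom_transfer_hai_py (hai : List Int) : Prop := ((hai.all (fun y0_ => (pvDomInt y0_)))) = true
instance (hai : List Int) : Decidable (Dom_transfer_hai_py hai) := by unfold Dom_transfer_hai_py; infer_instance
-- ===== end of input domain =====

-- B replaces A's map-then-sort with a single online pass: a binary search finds each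
-- mapped value's sorted position and it is inserted there (alternative decomposition).

-- ===== PORT A =====
-- A: build new_hai by appending the mapped value of each tile, then list.sort().
def transfer_hai_py (hai : List Int) : List Int :=
  let new_hai := hai.foldl (fun acc x =>
    acc ++ [if x = 16 then (34 : Int)
            else if x = 52 then 35
            else if x = 88 then 36
            else PySem.Int.floordiv x 4]) []
  PySem.List.sorted new_hai (fun x => x) false

-- ===== PORT B =====
-- B helper: Source B's 'while lo < hi' binary search, fuel = out.length (the loop halves
-- hi - lo, so out.length iterations always suffice; out[mid] is total via getElem?).
def bsLoop (out : List Int) (v : Int) : Nat → Nat → Nat → Nat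
  | 0, lo, _ => lo
  | fuel + 1, lo, hi =>
    if lo < hi then
      match out[(lo + hi) / 2]? with
      | some y => if y ≤ v then bsLoop out v fuel ((lo + hi) / 2 + 1) hi
                  else bsLoop out v fuel lo ((lo + hi) / 2)
      | none => lo
    else lo

def transfer_hai_py_alt (hai : List Int) : List Int :=
  hai.foldl (fun out x =>
    let v : Int := if x = 16 then 34
                   else if x = 52 then 35
                   else if x = 88 then 36
                   else PySem.Int.floordiv x 4
    PySem.List.insert out ((bsLoop out v out.length 0 out.length : Nat) : Int) v) []

-- ===== PRECONDITION & SPEC =====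
def Spec_transfer_hai_py (hai : List Int) (out : List Int) : Prop := out = transfer_hai_py_alt hai
instance (hai : List Int) (out : List Int) : Decidable (Spec_transfer_hai_py hai out) := by unfold Spec_transfer_hai_py; infer_instance

-- ===== CLAIM (what is proved, stated in full; the proofs are below) =====
def Claim_equal_transfer_hai_py : Prop := ∀ (hai : List Int), Dom_transfer_hai_py hai → Spec_transfer_hai_py hai (transfer_hai_py hai)

-- ===== LEMMAS AND PROOFS =====

-- Source B's binary search is bisect_right (same loop, branches flipped).
lemma bsLoop_eq_bisectRightLoop (out : List Int) (v : Int) :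
    ∀ (fuel lo hi : Nat), bsLoop out v fuel lo hi = PySem.List.bisectRightLoop out v fuel lo hi := by
  intro fuel
  induction fuel with
  | zero => intro lo hi; rfl
  | succ n ih =>
      intro lo hi
      simp only [bsLoop, PySem.List.bisectRightLoop]
      by_cases h : lo < hi
      · simp only [if_pos h]
        cases hy : out[(lo + hi) / 2]? with
        | none => rfl
        | some y =>
            by_cases hle : y ≤ v
            · simp [hle, not_lt.mpr hle, ih]
            · simp [hle, lt_of_not_ge hle, ih]
      · simp [h]

lemma bsLoop_eq_bisectRight (out : List Int) (v : Int) :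
    bsLoop out v out.length 0 out.length = PySem.List.bisectRight out v := by
  rw [bsLoop_eq_bisectRightLoop]; rfl

-- inserting v at its bisect_right position keeps the list sorted and adds exactly v
lemma step_sorted_perm (out : List Int) (v : Int) (hs : out.Pairwise (· ≤ ·)) :
    (out.take (PySem.List.bisectRight out v) ++ v :: out.drop (PySem.List.bisectRight out v)).Pairwise (· ≤ ·) ∧
    (out.take (PySem.List.bisectRight out v) ++ v :: out.drop (PySem.List.bisectRight out v)).Perm (v :: out) := by
  obtain ⟨hn, hlt, hge⟩ := PySem.List.bisectRight_spec out v hs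
  set n := PySem.List.bisectRight out v with hn'
  constructor
  · rw [List.pairwise_append]
    refine ⟨hs.take, ?_, ?_⟩
    · rw [List.pairwise_cons]
      refine ⟨?_, hs.drop⟩
      intro b hb
      obtain ⟨j, hj, rfl⟩ := List.mem_iff_getElem.mp hb
      have hj' : j < out.length - n := by simpa using hj
      rw [List.getElem_drop]
      exact le_of_lt (hge (n + j) (by omega) (by omega))
    · intro a ha b hb
      obtain ⟨j, hj, rfl⟩ := List.mem_iff_getElem.mp ha
      have hj' : j < min n out.length := by simpa using hj
      rw [List.getElem_take]
      have hav : out[j]'(by omega) ≤ v := hlt j (by omega) (by omega)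
      rcases List.mem_cons.mp hb with rfl | hb'
      · exact hav
      · obtain ⟨k, hk, rfl⟩ := List.mem_iff_getElem.mp hb'
        have hk' : k < out.length - n := by simpa using hk
        rw [List.getElem_drop]
        exact le_of_lt (lt_of_le_of_lt hav (hge (n + k) (by omega) (by omega)))
  · have e : out.take n ++ (out.drop n ++ ([] : List Int)) = out ++ [] := by
      rw [← List.append_assoc, List.take_append_drop]
    have hm : (out.take n ++ v :: (out.drop n ++ ([] : List Int))).Perm
        (v :: (out.take n ++ (out.drop n ++ ([] : List Int)))) := List.perm_middle
    rw [e] at hm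
    simpa using hm

-- the fold invariant: the accumulator stays sorted and is a permutation of acc ++ mapped prefix
lemma fold_invariant (f : Int → Int) (hai : List Int) :
    ∀ (acc : List Int), acc.Pairwise (· ≤ ·) →
      (hai.foldl (fun out x =>
          PySem.List.insert out ((bsLoop out (f x) out.length 0 out.length : Nat) : Int) (f x)) acc).Pairwise (· ≤ ·) ∧
      (hai.foldl (fun out x =>
          PySem.List.insert out ((bsLoop out (f x) out.length 0 out.length : Nat) : Int) (f x)) acc).Perm (acc ++ hai.map f) := by
  induction hai with
  | nil => intro acc hs; simpa using hs
  | cons x t ih =>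
      intro acc hs
      have hbr := bsLoop_eq_bisectRight acc (f x)
      have hn : PySem.List.bisectRight acc (f x) ≤ acc.length :=
        (PySem.List.bisectRight_spec acc (f x) hs).1
      have hins : PySem.List.insert acc ((bsLoop acc (f x) acc.length 0 acc.length : Nat) : Int) (f x)
          = acc.take (PySem.List.bisectRight acc (f x)) ++ f x :: acc.drop (PySem.List.bisectRight acc (f x)) := by
        rw [hbr, PySem.List.insert_natCast _ _ _ hn]
      obtain ⟨hsort, hperm⟩ := step_sorted_perm acc (f x) hs
      simp only [List.foldl_cons, hins]
      obtain ⟨ih1, ih2⟩ := ih _ hsort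
      refine ⟨ih1, ih2.trans ?_⟩
      have e : acc.take (PySem.List.bisectRight acc (f x)) ++
          (acc.drop (PySem.List.bisectRight acc (f x)) ++ t.map f) = acc ++ t.map f := by
        rw [← List.append_assoc, List.take_append_drop]
      have hmid : ((acc.take (PySem.List.bisectRight acc (f x)) ++
            f x :: acc.drop (PySem.List.bisectRight acc (f x))) ++ t.map f).Perm
          (f x :: (acc ++ t.map f)) := by
        rw [List.append_assoc, List.cons_append, ← e]
        exact List.perm_middle
      have h2 : (acc ++ (x :: t).map f).Perm (f x :: (acc ++ t.map f)) := by
        simp only [List.map_cons]; exact List.perm_middle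
      exact hmid.trans h2.symm

-- ===== VERDICT (by name: the statement is the Claim_ definition above) =====
theorem transfer_hai_py_spec : Claim_equal_transfer_hai_py := by
  intro hai _
  show transfer_hai_py hai = transfer_hai_py_alt hai
  unfold transfer_hai_py transfer_hai_py_alt
  simp only [PySem.List.foldl_append_singleton_eq_map, List.nil_append]
  obtain ⟨hsort, hperm⟩ := fold_invariant
    (fun x => if x = 16 then (34 : Int) else if x = 52 then 35 else if x = 88 then 36
              else PySem.Int.floordiv x 4) hai [] List.Pairwise.nil
  exact PySem.List.sorted_id_eq_of_perm_of_pairwise _ _ (by simpa using hperm) hsort
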